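-- pv_equiv track=rewrite | github.com/souravsubudhi36/health-vault | scripts/parse_health.py | parse_sections
-- ===== SOURCE A (Python) =====
-- def parse_sections(raw_text: str) -> dict:
--     """Split plain-text into a dict of section_name → [lines]."""
--     sections: dict = {}
--     current_section = None
--     current_lines: list = []
--
--     for line in raw_text.split("\n"):
--         stripped = line.strip()
--         if stripped.startswith("===") and stripped.endswith("===") and len(stripped) > 6:
--             if current_section is not None:
--                 sections[current_section] = current_lines
--             current_section = stripped.strip("=").strip()
--             current_lines = []
--         elif current_section is not None and stripped:
--             current_lines.append(stripped)
--
--     if current_section is not None: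
--         sections[current_section] = current_lines
--
--     return sections
-- ===== SOURCE B (Python) =====
-- def parse_sections(raw_text: str) -> dict:
--     """Split plain-text into a dict of section_name -> [lines]."""
--
--     def is_header(s):
--         return s.startswith("===") and s.endswith("===") and len(s) > 6
--
--     lines = raw_text.split("\n")
--     n = len(lines)
--     sections: dict = {}
--     i = 0
--     while i < n:
--         s = lines[i].strip()
--         if is_header(s):
--             name = s.strip("=").strip()
--             i += 1
--             body: list = []
--             while i < n and not is_header(lines[i].strip()):
--                 t = lines[i].strip()
--                 if t:
--                     body.append(t)
--                 i += 1
--             sections[name] = body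
--         else:
--             i += 1
--     return sections
-- ===== Notes on version B (the rewrite author's own statement) =====
-- stated objective: alternative
-- what changed: Replaces A's single fold carrying an Option-typed open-section state (with a duplicated end-of-input flush) by nested loops: an outer loop that finds each header and an inner loop that collects that section's body until the next header, assigning each section once with no Option state and no final flush.
import Mathlib
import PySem

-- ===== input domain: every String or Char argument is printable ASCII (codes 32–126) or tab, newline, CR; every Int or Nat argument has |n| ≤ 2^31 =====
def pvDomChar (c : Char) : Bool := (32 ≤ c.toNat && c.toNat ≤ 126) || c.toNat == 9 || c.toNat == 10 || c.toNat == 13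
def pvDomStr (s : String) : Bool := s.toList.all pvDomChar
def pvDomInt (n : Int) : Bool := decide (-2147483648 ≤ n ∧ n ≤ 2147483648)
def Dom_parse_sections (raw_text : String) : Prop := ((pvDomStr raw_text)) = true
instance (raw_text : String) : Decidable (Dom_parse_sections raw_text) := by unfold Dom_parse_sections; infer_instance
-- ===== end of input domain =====

-- B replaces A's single scan carrying an Option-typed open-section state and a final flush by
-- nested loops (skip to a header, then collect its body until the next header) with no
-- Option state and no end-of-input flush; objective: alternative decomposition, same cost.

-- the header test, identical in both Python sources: stripped.startswith("===") and stripped.endswith("===") and len(stripped) > 6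
def pvIsHeader (s : String) : Bool :=
  PySem.Str.startswith s "===" && PySem.Str.endswith s "===" && decide (6 < PySem.Str.len s)

-- ===== PORT A =====
-- the `if current_section is not None: sections[current_section] = current_lines` flush (appears twice in A)
def pvFinA (st : PySem.Dict String (List String) × Option String × List String) :
    PySem.Dict String (List String) :=
  match st.2.1 with
  | some c => st.1.insert c st.2.2
  | none => st.1

-- the body of A's `for line in raw_text.split("\n")`
def pvStepA (st : PySem.Dict String (List String) × Option String × List String) (line : String) :
    PySem.Dict String (List String) × Option String × List String :=
  let stripped := PySem.Str.strip line
  if pvIsHeader stripped then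
    (pvFinA st, some (PySem.Str.strip (PySem.Str.stripChars stripped "=")), [])
  else if st.2.1.isSome && !(stripped == "") then
    (st.1, st.2.1, st.2.2 ++ [stripped])
  else st

def parse_sections (raw_text : String) : List (String × List String) :=
  (pvFinA (((PySem.Str.split? raw_text "\n").getD []).foldl pvStepA (PySem.Dict.empty, none, []))).items

-- ===== PORT B =====
-- B's inner while: collect stripped non-empty lines until the next header; returns (body, rest)
def pvTakeBody : List String → List String → List String × List String
  | [], acc => (acc, [])
  | l :: rest, acc =>
    let t := PySem.Str.strip l
    if pvIsHeader t then (acc, l :: rest)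
    else pvTakeBody rest (if t == "" then acc else acc ++ [t])

theorem pvTakeBody_len : ∀ (ls acc : List String), (pvTakeBody ls acc).2.length ≤ ls.length := by
  intro ls
  induction ls with
  | nil => intro acc; simp [pvTakeBody]
  | cons l rest ih =>
    intro acc
    simp only [pvTakeBody]
    split
    · simp
    · exact Nat.le_succ_of_le (ih _)

-- B's outer while over the remaining lines
def pvGo : List String → PySem.Dict String (List String) → PySem.Dict String (List String)
  | [], d => d
  | l :: rest, d =>
    let s := PySem.Str.strip l
    if pvIsHeader s then
      let name := PySem.Str.strip (PySem.Str.stripChars s "=")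
      let p := pvTakeBody rest []
      pvGo p.2 (d.insert name p.1)
    else pvGo rest d
termination_by ls _ => ls.length
decreasing_by
  · exact Nat.lt_succ_of_le (pvTakeBody_len rest [])
  · simp

def parse_sections_alt (raw_text : String) : List (String × List String) :=
  (pvGo ((PySem.Str.split? raw_text "\n").getD []) PySem.Dict.empty).items

-- ===== PRECONDITION & SPEC =====
def Spec_parse_sections (raw_text : String) (out : List (String × List String)) : Prop := out = parse_sections_alt raw_text
instance (raw_text : String) (out : List (String × List String)) : Decidable (Spec_parse_sections raw_text out) := by unfold Spec_parse_sections; infer_instance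

-- ===== CLAIM (what is proved, stated in full; the proofs are below) =====
def Claim_equal_parse_sections : Prop := ∀ (raw_text : String), Dom_parse_sections raw_text → Spec_parse_sections raw_text (parse_sections raw_text)

-- ===== LEMMAS AND PROOFS =====

@[simp] theorem pvFinA_some (d : PySem.Dict String (List String)) (c : String) (acc : List String) :
    pvFinA (d, some c, acc) = d.insert c acc := rfl
@[simp] theorem pvFinA_none (d : PySem.Dict String (List String)) (acc : List String) :
    pvFinA (d, none, acc) = d := rfl

-- with an open section c and collected lines acc, A's remaining fold = collect the body, flush c, continue with B's loop
theorem pvFold_open : ∀ (ls : List String) (d : PySem.Dict String (List String)) (c : String) (acc : List String),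
    pvFinA (ls.foldl pvStepA (d, some c, acc))
      = pvGo (pvTakeBody ls acc).2 (d.insert c (pvTakeBody ls acc).1) := by
  intro ls
  induction ls with
  | nil => intro d c acc; simp [pvTakeBody, pvGo, pvFinA]
  | cons l rest ih =>
    intro d c acc
    by_cases h : pvIsHeader (PySem.Str.strip l) = true
    · simp only [List.foldl_cons, pvStepA, pvTakeBody, h, if_pos, pvFinA_some]
      rw [ih]
      conv_rhs => rw [pvGo]
      simp [h]
    · by_cases he : PySem.Str.strip l == ""
      · simp only [List.foldl_cons, pvStepA, pvTakeBody, h, he, if_neg, Bool.false_eq_true,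
          not_false_iff, Option.isSome_some, Bool.not_true, Bool.and_false, ite_true]
        rw [ih]
      · simp only [List.foldl_cons, pvStepA, pvTakeBody, h, he, if_neg, Bool.false_eq_true,
          not_false_iff, Option.isSome_some, Bool.not_false, Bool.and_true, if_true]
        rw [ih]

-- with no open section, A's fold = B's loop
theorem pvFold_closed : ∀ (ls : List String) (d : PySem.Dict String (List String)),
    pvFinA (ls.foldl pvStepA (d, none, [])) = pvGo ls d := by
  intro ls
  induction ls with
  | nil => intro d; simp [pvGo, pvFinA]
  | cons l rest ih =>
    intro d
    by_cases h : pvIsHeader (PySem.Str.strip l) = true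
    · simp only [List.foldl_cons, pvStepA, h, if_pos, pvFinA_none]
      rw [pvFold_open]
      conv_rhs => rw [pvGo]
      simp [h]
    · simp only [List.foldl_cons, pvStepA, h, Bool.false_eq_true, if_neg, not_false_iff,
        Option.isSome_none, Bool.false_and]
      rw [ih]
      conv_rhs => rw [pvGo]
      simp [h]

-- ===== VERDICT (by name: the statement is the Claim_ definition above) =====
theorem parse_sections_spec : Claim_equal_parse_sections := by
  intro raw_text _
  unfold Spec_parse_sections parse_sections parse_sections_alt
  rw [pvFold_closed]
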